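-- pv_equiv track=rewrite | github.com/JaeyunPark1223/PS | 백준/Silver/24495. Non－Transitive Dice/Non－Transitive Dice.py | solve
-- ===== SOURCE A (Python) =====
-- def x_beats_y(A,B) :
--   score_a,score_b = 0,0
--   for a in A :
--     for b in B :
--       if a > b : score_a += 1
--       elif b > a : score_b += 1
--   if score_a > score_b :  return True
--   return False
--
-- def solve(A,B) :
--   for a in range(1,11):
--     for b in range(1,11) :
--       for c in range(1,11) :
--         for d in range(1,11) :
--           if x_beats_y([a,b,c,d],A) and x_beats_y(B,[a,b,c,d]) :
--             return "yes"
--   return "no"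
-- ===== SOURCE B (Python) =====
-- def solve(A, B):
--     # Per-face weights: picking face v contributes wa(v) to (score of X vs A)
--     # and wb(v) to (score of B vs X); a candidate die X = 4 faces from 1..10
--     # works iff both weight sums are positive.  DP over the 4 picks on the
--     # set of reachable (sumA, sumB) states instead of enumerating 10^4 dice.
--     w = [(sum(1 for a in A if v > a) - sum(1 for a in A if a > v),
--           sum(1 for b in B if b > v) - sum(1 for b in B if v > b))
--          for v in range(1, 11)]
--     states = {(0, 0)}
--     for _ in range(4):
--         states = {(sa + xa, sb + xb) for (sa, sb) in states for (xa, xb) in w}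
--     return "yes" if any(sa > 0 and sb > 0 for (sa, sb) in states) else "no"
-- ===== Notes on version B (the rewrite author's own statement) =====
-- stated objective: faster
-- what changed: Replaces the enumeration of all 10^4 candidate dice, each scored by a full pairwise comparison against A and B, with per-face weight pairs computed once and a set-based DP over the 4 face picks on reachable (sumA,sumB) states, checking any reachable state for double positivity.
import Mathlib
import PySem

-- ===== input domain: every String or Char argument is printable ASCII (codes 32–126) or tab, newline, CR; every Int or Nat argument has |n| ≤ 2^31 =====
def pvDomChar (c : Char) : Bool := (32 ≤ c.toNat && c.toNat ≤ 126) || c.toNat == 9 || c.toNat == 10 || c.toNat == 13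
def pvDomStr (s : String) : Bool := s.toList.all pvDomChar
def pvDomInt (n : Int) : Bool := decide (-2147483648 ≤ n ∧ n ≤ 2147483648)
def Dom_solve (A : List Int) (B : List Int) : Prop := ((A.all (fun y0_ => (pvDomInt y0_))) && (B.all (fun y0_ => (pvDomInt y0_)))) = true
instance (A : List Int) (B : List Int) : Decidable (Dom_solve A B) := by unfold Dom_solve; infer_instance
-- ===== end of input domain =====

-- B replaces A's enumeration of all 10^4 candidate dice (each checked with a full
-- pairwise comparison) by per-face weight pairs and a set-DP over the 4 picks
-- (objective: faster, far smaller constant; same return value).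

-- ===== PORT A =====
def innerStep (a : Int) (s : Int × Int) (b : Int) : Int × Int :=
  if a > b then (s.1 + 1, s.2) else if b > a then (s.1, s.2 + 1) else s

def xBeatsY (X Y : List Int) : Bool :=
  let s := X.foldl (fun s a => Y.foldl (innerStep a) s) ((0 : Int), (0 : Int))
  decide (s.1 > s.2)

def solve (A : List Int) (B : List Int) : String :=
  -- the four nested 'for … return "yes"' loops are the any-chain below
  if (PySem.List.pyRange 1 11 1).any (fun a =>
       (PySem.List.pyRange 1 11 1).any (fun b =>
         (PySem.List.pyRange 1 11 1).any (fun c =>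
           (PySem.List.pyRange 1 11 1).any (fun d =>
             xBeatsY [a, b, c, d] A && xBeatsY B [a, b, c, d]))))
  then "yes" else "no"

-- ===== PORT B =====
def wPair (A B : List Int) (v : Int) : Int × Int :=
  ((A.countP (fun a => decide (v > a)) : Int) - (A.countP (fun a => decide (a > v)) : Int),
   (B.countP (fun b => decide (b > v)) : Int) - (B.countP (fun b => decide (v > b)) : Int))

def stepSet (w : List (Int × Int)) (st : PySem.Set (Int × Int)) : PySem.Set (Int × Int) :=
  PySem.Set.ofList (st.flatMap (fun s => w.map (fun x => (s.1 + x.1, s.2 + x.2))))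

def solve_alt (A : List Int) (B : List Int) : String :=
  let w := (PySem.List.pyRange 1 11 1).map (wPair A B)
  let states := (PySem.List.pyRange 0 4 1).foldl (fun st _ => stepSet w st)
                  (PySem.Set.ofList [((0 : Int), (0 : Int))])
  if states.any (fun s => decide (s.1 > 0) && decide (s.2 > 0)) then "yes" else "no"

-- ===== PRECONDITION & SPEC =====
def Spec_solve (A : List Int) (B : List Int) (out : String) : Prop := out = solve_alt A B
instance (A : List Int) (B : List Int) (out : String) : Decidable (Spec_solve A B out) := by unfold Spec_solve; infer_instance

-- ===== CLAIM (what is proved, stated in full; the proofs are below) =====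
def Claim_equal_solve : Prop := ∀ (A : List Int) (B : List Int), Dom_solve A B → Spec_solve A B (solve A B)

-- ===== LEMMAS AND PROOFS =====

-- counts of wins/losses of one value against a list
def cgt (a : Int) (Y : List Int) : Int := (Y.countP (fun b => decide (a > b)) : Int)
def clt (a : Int) (Y : List Int) : Int := (Y.countP (fun b => decide (b > a)) : Int)
def sgt (X Y : List Int) : Int := (X.map (fun a => cgt a Y)).sum
def slt (X Y : List Int) : Int := (X.map (fun a => clt a Y)).sum

theorem inner_foldl (a : Int) (Y : List Int) (s : Int × Int) :
    Y.foldl (innerStep a) s = (s.1 + cgt a Y, s.2 + clt a Y) := by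
  induction Y generalizing s with
  | nil => simp [cgt, clt]
  | cons b Y ih =>
    rw [List.foldl_cons, ih]
    unfold innerStep cgt clt
    rw [List.countP_cons, List.countP_cons]
    apply Prod.ext <;> simp <;> split_ifs <;> simp_all <;> omega

theorem outer_foldl (X Y : List Int) (s : Int × Int) :
    X.foldl (fun s a => Y.foldl (innerStep a) s) s = (s.1 + sgt X Y, s.2 + slt X Y) := by
  induction X generalizing s with
  | nil => simp [sgt, slt]
  | cons a X ih =>
    rw [List.foldl_cons, inner_foldl, ih]
    unfold sgt slt
    simp
    constructor <;> ring

theorem xBeatsY_eq (X Y : List Int) :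
    xBeatsY X Y = decide (sgt X Y > slt X Y) := by
  unfold xBeatsY
  rw [outer_foldl]
  simp

theorem sum_ite (B : List Int) (q : Int → Bool) :
    (B.map (fun b => if q b then (1 : Int) else 0)).sum = (B.countP q : Int) := by
  induction B with
  | nil => simp
  | cons b B ih => rw [List.map_cons, List.sum_cons, ih, List.countP_cons]; split_ifs <;> simp_all; omega

theorem sum_countP_swap (p : Int → Int → Bool) (F : List Int) (B : List Int) :
    (B.map (fun b => (F.countP (p b) : Int))).sum
      = (F.map (fun v => (B.countP (fun b => p b v) : Int))).sum := by
  induction F with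
  | nil => simp
  | cons v F ih =>
    have h : ∀ b : Int, ((v :: F).countP (p b) : Int)
        = (F.countP (p b) : Int) + (if p b v then (1:Int) else 0) := by
      intro b; rw [List.countP_cons]; split_ifs <;> simp_all
    calc (B.map (fun b => ((v :: F).countP (p b) : Int))).sum
        = (B.map (fun b => (F.countP (p b) : Int) + (if p b v then (1:Int) else 0))).sum := by
          simp only [h]
      _ = (B.map (fun b => (F.countP (p b) : Int))).sum
            + (B.map (fun b => (if p b v then (1:Int) else 0))).sum := by
          rw [← List.sum_map_add]
      _ = (F.map (fun u => (B.countP (fun b => p b u) : Int))).sum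
            + (B.countP (fun b => p b v) : Int) := by
          rw [ih, sum_ite B (fun b => p b v)]
      _ = ((v :: F).map (fun u => (B.countP (fun b => p b u) : Int))).sum := by
          simp; ring

theorem beat1 (A B : List Int) (a b c d : Int) :
    (xBeatsY [a, b, c, d] A = true)
      ↔ (wPair A B a).1 + (wPair A B b).1 + (wPair A B c).1 + (wPair A B d).1 > 0 := by
  rw [xBeatsY_eq]
  simp only [sgt, slt, List.map_cons, List.map_nil, List.sum_cons, List.sum_nil,
    wPair, decide_eq_true_eq]
  unfold cgt clt
  omega

theorem beat2 (A B : List Int) (a b c d : Int) :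
    (xBeatsY B [a, b, c, d] = true)
      ↔ (wPair A B a).2 + (wPair A B b).2 + (wPair A B c).2 + (wPair A B d).2 > 0 := by
  rw [xBeatsY_eq]
  unfold sgt slt
  rw [show (fun x => cgt x [a,b,c,d]) = (fun x => ((([a,b,c,d]).countP (fun y => decide (x > y)) : Int))) from rfl,
      show (fun x => clt x [a,b,c,d]) = (fun x => ((([a,b,c,d]).countP (fun y => decide (y > x)) : Int))) from rfl,
      sum_countP_swap (fun x y => decide (x > y)) [a,b,c,d] B,
      sum_countP_swap (fun x y => decide (y > x)) [a,b,c,d] B]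
  simp only [List.map_cons, List.map_nil, List.sum_cons, List.sum_nil, wPair, decide_eq_true_eq]
  omega

-- membership in one DP step
theorem mem_stepSet (w : List (Int × Int)) (st : PySem.Set (Int × Int)) (x : Int × Int) :
    x ∈ stepSet w st ↔ ∃ s ∈ st, ∃ p ∈ w, x = (s.1 + p.1, s.2 + p.2) := by
  unfold stepSet
  rw [PySem.Set.mem_ofList, List.mem_flatMap]
  constructor
  · rintro ⟨s, hs, hx⟩
    rw [List.mem_map] at hx
    obtain ⟨p, hp, rfl⟩ := hx
    exact ⟨s, hs, p, hp, rfl⟩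
  · rintro ⟨s, hs, p, hp, rfl⟩
    exact ⟨s, hs, List.mem_map.2 ⟨p, hp, rfl⟩⟩

theorem pr4 : PySem.List.pyRange 0 4 1 = [0, 1, 2, 3] := by decide

-- the common proposition both programs decide
def Good (A B : List Int) : Prop :=
  ∃ a b c d : Int, a ∈ PySem.List.pyRange 1 11 1 ∧ b ∈ PySem.List.pyRange 1 11 1 ∧
    c ∈ PySem.List.pyRange 1 11 1 ∧ d ∈ PySem.List.pyRange 1 11 1 ∧
    (wPair A B a).1 + (wPair A B b).1 + (wPair A B c).1 + (wPair A B d).1 > 0 ∧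
    (wPair A B a).2 + (wPair A B b).2 + (wPair A B c).2 + (wPair A B d).2 > 0

theorem solve_cond (A B : List Int) :
    ((PySem.List.pyRange 1 11 1).any (fun a =>
       (PySem.List.pyRange 1 11 1).any (fun b =>
         (PySem.List.pyRange 1 11 1).any (fun c =>
           (PySem.List.pyRange 1 11 1).any (fun d =>
             xBeatsY [a, b, c, d] A && xBeatsY B [a, b, c, d])))) = true) ↔ Good A B := by
  simp only [List.any_eq_true, Bool.and_eq_true]
  constructor
  · rintro ⟨a, ha, b, hb, c, hc, d, hd, h1, h2⟩
    exact ⟨a, b, c, d, ha, hb, hc, hd, (beat1 A B a b c d).1 h1, (beat2 A B a b c d).1 h2⟩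
  · rintro ⟨a, b, c, d, ha, hb, hc, hd, h1, h2⟩
    exact ⟨a, ha, b, hb, c, hc, d, hd, (beat1 A B a b c d).2 h1, (beat2 A B a b c d).2 h2⟩

theorem alt_cond (A B : List Int) :
    (((PySem.List.pyRange 0 4 1).foldl
        (fun st _ => stepSet ((PySem.List.pyRange 1 11 1).map (wPair A B)) st)
        (PySem.Set.ofList [((0 : Int), (0 : Int))])).any
      (fun s => decide (s.1 > 0) && decide (s.2 > 0)) = true) ↔ Good A B := by
  rw [pr4]
  set w := (PySem.List.pyRange 1 11 1).map (wPair A B) with hw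
  simp only [List.foldl_cons, List.foldl_nil]
  rw [List.any_eq_true]
  have hmemw : ∀ p : Int × Int, p ∈ w ↔ ∃ v ∈ PySem.List.pyRange 1 11 1, p = wPair A B v := by
    intro p; rw [hw, List.mem_map]
    constructor
    · rintro ⟨v, hv, rfl⟩; exact ⟨v, hv, rfl⟩
    · rintro ⟨v, hv, rfl⟩; exact ⟨v, hv, rfl⟩
  constructor
  · rintro ⟨s, hs, hgood⟩
    rw [mem_stepSet] at hs; obtain ⟨s3, hs3, p4, hp4, rfl⟩ := hs
    rw [mem_stepSet] at hs3; obtain ⟨s2, hs2, p3, hp3, rfl⟩ := hs3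
    rw [mem_stepSet] at hs2; obtain ⟨s1, hs1, p2, hp2, rfl⟩ := hs2
    rw [mem_stepSet] at hs1; obtain ⟨s0, hs0, p1, hp1, rfl⟩ := hs1
    rw [PySem.Set.mem_ofList] at hs0
    simp only [List.mem_singleton] at hs0
    subst hs0
    obtain ⟨v1, hv1, rfl⟩ := (hmemw p1).1 hp1
    obtain ⟨v2, hv2, rfl⟩ := (hmemw p2).1 hp2
    obtain ⟨v3, hv3, rfl⟩ := (hmemw p3).1 hp3
    obtain ⟨v4, hv4, rfl⟩ := (hmemw p4).1 hp4
    simp only [Bool.and_eq_true, decide_eq_true_eq] at hgood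
    refine ⟨v1, v2, v3, v4, hv1, hv2, hv3, hv4, ?_, ?_⟩ <;> simp at hgood <;> omega
  · rintro ⟨a, b, c, d, ha, hb, hc, hd, h1, h2⟩
    have h0 : ((0 : Int), (0 : Int)) ∈ (PySem.Set.ofList [((0 : Int), (0 : Int))] : PySem.Set (Int × Int)) := by
      rw [PySem.Set.mem_ofList]; simp
    have h1 := (mem_stepSet w _ _).2 ⟨_, h0, wPair A B a, (hmemw _).2 ⟨a, ha, rfl⟩, rfl⟩
    have h2 := (mem_stepSet w _ _).2 ⟨_, h1, wPair A B b, (hmemw _).2 ⟨b, hb, rfl⟩, rfl⟩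
    have h3 := (mem_stepSet w _ _).2 ⟨_, h2, wPair A B c, (hmemw _).2 ⟨c, hc, rfl⟩, rfl⟩
    have h4 := (mem_stepSet w _ _).2 ⟨_, h3, wPair A B d, (hmemw _).2 ⟨d, hd, rfl⟩, rfl⟩
    refine ⟨_, h4, ?_⟩
    simp only [Bool.and_eq_true, decide_eq_true_eq]
    constructor <;> simp <;> omega

-- ===== VERDICT (by name: the statement is the Claim_ definition above) =====
theorem solve_spec : Claim_equal_solve := by
  intro A B _
  unfold Spec_solve solve solve_alt
  by_cases h : Good A B
  · rw [if_pos ((solve_cond A B).2 h), if_pos ((alt_cond A B).2 h)]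
  · rw [if_neg (fun hc => h ((solve_cond A B).1 hc)),
        if_neg (fun hc => h ((alt_cond A B).1 hc))]
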